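-- pv_equiv track=rewrite | github.com/Aiguasol-coop/potential-minigrid-explorer | src/app/service_offgrid_planner/grid.py | sort_consumers_by_priority
-- ===== SOURCE A (Python) =====
-- def sort_consumers_by_priority(
--     consumers_data: dict[str, dict[str, int]], priority_map: dict[str, int]
-- ) -> list[dict[str, str]]:
--     sorted_consumers: list[dict[str, int | str]] = []
--
--     for category, consumers in consumers_data.items():
--         for name, count in consumers.items():
--             priority = priority_map.get(name, 33)  # Default to 33 if priority not found
--             sorted_consumers.append(
--                 {"category": category, "details": name, "priority": priority, "count": count}
--             )
--
--     # Sort by priority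
--     sorted_consumers.sort(key=lambda x: x["priority"])
--
--     # Return sorted consumers as a list of dictionaries
--     final_consumers: list[dict[str, str]] = [
--         {consumer["category"]: consumer["details"]}
--         for consumer in sorted_consumers
--         for _ in range(consumers_data[consumer["category"]][consumer["details"]])  # type: ignore
--     ]  # type: ignore
--
--     return final_consumers
-- ===== SOURCE B (Python) =====
-- def sort_consumers_by_priority(consumers_data, priority_map):
--     # Bucket consumers by priority in encounter order, then concatenate buckets
--     # over the sorted priority keys (stable-sort equivalent), reusing the stored count.
--     buckets = {}
--     for category, consumers in consumers_data.items():
--         for name, count in consumers.items():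
--             priority = priority_map.get(name, 33)
--             buckets.setdefault(priority, []).append((category, name, count))
--     result = []
--     for priority in sorted(buckets):
--         for category, name, count in buckets[priority]:
--             result.extend([{category: name}] * count)
--     return result
-- ===== Notes on version B (the rewrite author's own statement) =====
-- stated objective: alternative
-- what changed: Instead of building one flat list, fully sorting it by priority, and re-indexing consumers_data for each count, B groups consumers into a priority->bucket dict in one pass and concatenates the buckets over the sorted distinct priority keys, expanding by the stored count.
import Mathlib
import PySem

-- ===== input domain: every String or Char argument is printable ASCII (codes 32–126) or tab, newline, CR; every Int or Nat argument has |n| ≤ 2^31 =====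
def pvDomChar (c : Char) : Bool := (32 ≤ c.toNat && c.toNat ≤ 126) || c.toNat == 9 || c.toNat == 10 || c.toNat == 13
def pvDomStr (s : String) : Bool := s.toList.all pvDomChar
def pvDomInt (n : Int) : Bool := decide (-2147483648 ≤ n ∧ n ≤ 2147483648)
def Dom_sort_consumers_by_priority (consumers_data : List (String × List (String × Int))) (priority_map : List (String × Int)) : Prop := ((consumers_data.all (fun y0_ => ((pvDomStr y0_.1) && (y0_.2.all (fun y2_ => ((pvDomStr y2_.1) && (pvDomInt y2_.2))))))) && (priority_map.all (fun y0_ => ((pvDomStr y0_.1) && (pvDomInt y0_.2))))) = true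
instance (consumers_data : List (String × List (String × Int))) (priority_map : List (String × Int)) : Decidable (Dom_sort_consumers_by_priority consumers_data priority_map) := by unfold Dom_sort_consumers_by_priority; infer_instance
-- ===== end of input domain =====

-- B groups consumers into priority buckets in one pass and concatenates the buckets over the
-- sorted distinct priorities (reusing the stored count), instead of A's full stable sort of a
-- flat list followed by re-indexing consumers_data for each count; objective: alternative.

-- ===== PORT A =====
def sort_consumers_by_priority (consumers_data : List (String × List (String × Int))) (priority_map : List (String × Int)) : List (List (String × String)) :=
  let sorted_consumers : List (String × String × Int × Int) :=
    consumers_data.foldl (fun acc cc =>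
      cc.2.foldl (fun acc nc =>
        acc ++ [(cc.1, nc.1, (PySem.Dict.mk priority_map).getD nc.1 33, nc.2)]) acc) []
  let sc := PySem.List.sorted sorted_consumers (fun x => x.2.2.1) false
  sc.flatMap (fun c =>
    match (PySem.Dict.mk consumers_data).get? c.1 with
    | none => []      -- Python: KeyError (only reachable with duplicate keys, outside Pre_)
    | some inner =>
      match (PySem.Dict.mk inner).get? c.2.1 with
      | none => []    -- Python: KeyError (only reachable with duplicate keys, outside Pre_)
      | some cnt => (PySem.List.pyRange 0 cnt).map (fun _ => [(c.1, c.2.1)]))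

-- ===== PORT B =====
def sort_consumers_by_priority_alt (consumers_data : List (String × List (String × Int))) (priority_map : List (String × Int)) : List (List (String × String)) :=
  let buckets : PySem.Dict Int (List (String × String × Int)) :=
    consumers_data.foldl (fun b cc =>
      cc.2.foldl (fun b nc =>
        b.modify ((PySem.Dict.mk priority_map).getD nc.1 33) [] (· ++ [(cc.1, nc.1, nc.2)])) b)
      PySem.Dict.empty
  let ks := PySem.List.sorted buckets.keys (fun p => p) false
  ks.foldl (fun res p =>
    (buckets.getD p []).foldl (fun res t =>
      res ++ PySem.List.pyRepeat [[(t.1, t.2.1)]] t.2.2) res) []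

-- ===== PRECONDITION & SPEC =====
-- Pre_ is dict well-formedness: both dict-typed arguments must have distinct keys (a Python dict
-- cannot carry duplicate keys, so this excludes no input the Python function can receive).
def Pre_sort_consumers_by_priority (consumers_data : List (String × List (String × Int))) (priority_map : List (String × Int)) : Prop :=
  (consumers_data.map Prod.fst).Nodup ∧ ∀ cc ∈ consumers_data, (cc.2.map Prod.fst).Nodup
instance (consumers_data : List (String × List (String × Int))) (priority_map : List (String × Int)) : Decidable (Pre_sort_consumers_by_priority consumers_data priority_map) := by unfold Pre_sort_consumers_by_priority; infer_instance
def pvWitness_sort_consumers_by_priority : (List (String × List (String × Int))) × (List (String × Int)) :=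
  ([("homes", [("low", 2), ("high", 1)]), ("shops", [("high", 3)])], [("high", 1), ("low", 9)])
def Spec_sort_consumers_by_priority (consumers_data : List (String × List (String × Int))) (priority_map : List (String × Int)) (out : List (List (String × String))) : Prop := out = sort_consumers_by_priority_alt consumers_data priority_map
instance (consumers_data : List (String × List (String × Int))) (priority_map : List (String × Int)) (out : List (List (String × String))) : Decidable (Spec_sort_consumers_by_priority consumers_data priority_map out) := by unfold Spec_sort_consumers_by_priority; infer_instance

-- ===== CLAIM (what is proved, stated in full; the proofs are below) =====
def Claim_equal_sort_consumers_by_priority : Prop := ∀ (consumers_data : List (String × List (String × Int))) (priority_map : List (String × Int)), Dom_sort_consumers_by_priority consumers_data priority_map → Pre_sort_consumers_by_priority consumers_data priority_map → Spec_sort_consumers_by_priority consumers_data priority_map (sort_consumers_by_priority consumers_data priority_map)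

-- ===== LEMMAS AND PROOFS =====

-- Proof-side abbreviations: the flattened quadruple list (category, name, priority, count).
def pvPrio (priority_map : List (String × Int)) (n : String) : Int :=
  (PySem.Dict.mk priority_map).getD n 33
def pvF (consumers_data : List (String × List (String × Int))) (priority_map : List (String × Int)) : List (String × String × Int × Int) :=
  consumers_data.flatMap (fun cc => cc.2.map (fun nc => (cc.1, nc.1, pvPrio priority_map nc.1, nc.2)))
def pvEA (consumers_data : List (String × List (String × Int))) (c : String × String × Int × Int) : List (List (String × String)) :=
  match (PySem.Dict.mk consumers_data).get? c.1 with
  | none => []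
  | some inner =>
    match (PySem.Dict.mk inner).get? c.2.1 with
    | none => []
    | some cnt => (PySem.List.pyRange 0 cnt).map (fun _ => [(c.1, c.2.1)])

-- insert a key into a strictly increasing key list (no-op if present)
def pvInskey (k : Int) : List Int → List Int
  | [] => [k]
  | p :: ps => if k < p then k :: p :: ps else if k = p then p :: ps else p :: pvInskey k ps

lemma pv_insertBy_append_skip {α : Type} (before : α → α → Bool) (d : α) (l r : List α)
    (h : ∀ a ∈ l, before d a = false) :
    PySem.List.insertBy before d (l ++ r) = l ++ PySem.List.insertBy before d r := by
  induction l with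
  | nil => simp
  | cons a t ih =>
      have ha := h a List.mem_cons_self
      simp [PySem.List.insertBy, ha, ih (fun x hx => h x (List.mem_cons_of_mem _ hx))]

lemma pv_insertBy_cons_head {α : Type} (before : α → α → Bool) (d : α) (l : List α)
    (h : ∀ a, l.head? = some a → before d a = true) :
    PySem.List.insertBy before d l = d :: l := by
  cases l with
  | nil => rfl
  | cons a t => simp [PySem.List.insertBy, h a rfl]

lemma pvInskey_of_mem (k : Int) (ks : List Int) (h : k ∈ ks) (hp : ks.Pairwise (· < ·)) :
    pvInskey k ks = ks := by
  induction ks with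
  | nil => cases h
  | cons p ps ih =>
      rcases List.mem_cons.mp h with rfl | hk
      · simp [pvInskey]
      · have hpk : p < k := (List.pairwise_cons.mp hp).1 k hk
        have : pvInskey k ps = ps := ih hk (List.pairwise_cons.mp hp).2
        simp [pvInskey, not_lt_of_gt hpk, this]

lemma pv_insertBy_id_eq_pvInskey (k : Int) (ks : List Int) (h : k ∉ ks) :
    PySem.List.insertBy (fun a b => decide (a < b)) k ks = pvInskey k ks := by
  induction ks with
  | nil => rfl
  | cons p ps ih =>
      have hne : k ≠ p := fun he => h (he ▸ List.mem_cons_self)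
      by_cases hk : k < p
      · simp [PySem.List.insertBy, pvInskey, hk]
      · simp [PySem.List.insertBy, pvInskey, hk, hne,
          ih (fun hm => h (List.mem_cons_of_mem _ hm))]

lemma pv_insertBy_flatMap_buckets {α : Type} (key : α → Int) (d : α) (G : Int → List α) :
    ∀ ks : List Int, ks.Pairwise (· < ·) →
    (∀ p ∈ ks, ∀ a ∈ G p, key a = p) →
    (∀ p ∈ ks, G p ≠ []) →
    (key d ∉ ks → G (key d) = []) →
    PySem.List.insertBy (fun a b => decide (key a < key b)) d (ks.flatMap G) =
      (pvInskey (key d) ks).flatMap (fun p => G p ++ if key d = p then [d] else []) := by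
  intro ks
  induction ks with
  | nil =>
      intro _ _ _ h4
      simp [pvInskey, PySem.List.insertBy, h4 (List.not_mem_nil)]
  | cons p ps ih =>
      intro hpair h2 h3 h4
      have hplt : ∀ q ∈ ps, p < q := (List.pairwise_cons.mp hpair).1
      have hps : ps.Pairwise (· < ·) := (List.pairwise_cons.mp hpair).2
      by_cases hk1 : key d < p
      · -- new smallest key: d goes in front
        have hnm : key d ∉ p :: ps := by
          intro hm
          rcases List.mem_cons.mp hm with rfl | hm'
          · exact absurd hk1 (lt_irrefl _)
          · exact absurd (lt_trans hk1 (hplt _ hm')) (lt_irrefl _)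
        have hG0 : G (key d) = [] := h4 hnm
        have hhead : ∀ a, ((p :: ps).flatMap G).head? = some a → (fun a b => decide (key a < key b)) d a = true := by
          intro a ha
          cases hx : G p with
          | nil => exact absurd hx (h3 p List.mem_cons_self)
          | cons b t =>
              have hhd : ((p :: ps).flatMap G).head? = some b := by
                simp [List.flatMap_cons, hx]
              have hba : b = a := by rw [hhd] at ha; injection ha
              have hb : key b = p := h2 p List.mem_cons_self b (by rw [hx]; exact List.mem_cons_self)
              rw [← hba]
              simp [hb, hk1]
        rw [pv_insertBy_cons_head _ _ _ hhead]
        have hcongr : (p :: ps).flatMap (fun q => G q ++ if key d = q then [d] else []) = (p :: ps).flatMap G := by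
          apply List.flatMap_congr
          intro q hq
          have : key d ≠ q := fun he => hnm (he ▸ hq)
          simp [this]
        have hins : pvInskey (key d) (p :: ps) = key d :: p :: ps := by
          simp [pvInskey, hk1]
        rw [hins]
        conv_rhs => rw [List.flatMap_cons, hcongr]
        rw [if_pos rfl, hG0]
        simp
      · by_cases hk2 : key d = p
        · -- existing key: d goes at the end of its bucket
          have hskip : ∀ a ∈ G p, (fun a b => decide (key a < key b)) d a = false := by
            intro a ha
            have hka : key a = p := h2 p List.mem_cons_self a ha
            simp [hka, hk2]
          rw [List.flatMap_cons, pv_insertBy_append_skip _ _ _ _ hskip]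
          have hcongr : ps.flatMap (fun q => G q ++ if key d = q then [d] else []) = ps.flatMap G := by
            apply List.flatMap_congr
            intro q hq
            have : key d ≠ q := by rw [hk2]; exact ne_of_lt (hplt q hq)
            simp [this]
          have htail : PySem.List.insertBy (fun a b => decide (key a < key b)) d (ps.flatMap G) = d :: ps.flatMap G := by
            apply pv_insertBy_cons_head
            intro a ha
            cases ps with
            | nil => simp at ha
            | cons q qs =>
                cases hx : G q with
                | nil => exact absurd hx (h3 q (List.mem_cons_of_mem _ List.mem_cons_self))
                | cons b t =>
                    have hhd : ((q :: qs).flatMap G).head? = some b := by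
                      simp [List.flatMap_cons, hx]
                    have hba : b = a := by rw [hhd] at ha; injection ha
                    have hb : key b = q := h2 q (List.mem_cons_of_mem _ List.mem_cons_self) b (by rw [hx]; exact List.mem_cons_self)
                    rw [← hba]
                    have hlt : key d < key b := by rw [hb, hk2]; exact hplt q List.mem_cons_self
                    simp [hlt]
          have hins : pvInskey (key d) (p :: ps) = p :: ps := by
            simp [pvInskey, hk1, hk2]
          rw [htail, hins, List.flatMap_cons, hcongr, if_pos hk2]
          simp
        · -- key d > p: skip this bucket and recurse
          have hpk : p < key d := by
            rcases lt_trichotomy (key d) p with h | h | h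
            · exact absurd h hk1
            · exact absurd h hk2
            · exact h
          have hskip : ∀ a ∈ G p, (fun a b => decide (key a < key b)) d a = false := by
            intro a ha
            have hka : key a = p := h2 p List.mem_cons_self a ha
            simp only [hka, decide_eq_false_iff_not]
            exact not_lt.mpr (le_of_lt hpk)
          rw [List.flatMap_cons, pv_insertBy_append_skip _ _ _ _ hskip]
          have hIH := ih hps (fun q hq => h2 q (List.mem_cons_of_mem _ hq)) (fun q hq => h3 q (List.mem_cons_of_mem _ hq))
            (fun hnm => h4 (fun hm => by
              rcases List.mem_cons.mp hm with he | hm'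
              · exact hk2 he
              · exact hnm hm'))
          have hins : pvInskey (key d) (p :: ps) = p :: pvInskey (key d) ps := by
            simp [pvInskey, hk1, hk2]
          rw [hIH, hins, List.flatMap_cons, if_neg (fun he => hk2 he)]
          simp

lemma pv_sorted_append_singleton {α : Type} (key : α → Int) (xs : List α) (x : α) :
    PySem.List.sorted (xs ++ [x]) key false =
      PySem.List.insertBy (fun a b => decide (key a < key b)) x (PySem.List.sorted xs key false) := by
  rw [PySem.List.sorted_eq_foldl_insertBy, PySem.List.sorted_eq_foldl_insertBy, List.foldl_append]
  rfl

-- stable sort = concatenation of filter-buckets over the sorted distinct keys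
lemma pv_stable_bucket {α : Type} (key : α → Int) (xs : List α) :
    PySem.List.sorted xs key false =
    (PySem.List.sorted (PySem.Set.ofList (xs.map key)) (fun p => p) false).flatMap
      (fun p => xs.filter (fun a => key a == p)) := by
  induction xs using List.reverseRecOn with
  | nil => rfl
  | append_singleton xs d ih =>
      have hpair : List.Pairwise (· < ·) (PySem.List.sorted (PySem.Set.ofList (xs.map key)) (fun p => p) false) :=
        PySem.List.sorted_ofList_pairwise_lt (xs.map key)
      have hmemks : ∀ q, q ∈ PySem.List.sorted (PySem.Set.ofList (xs.map key)) (fun p => p) false ↔ q ∈ xs.map key := by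
        intro q
        rw [PySem.List.mem_sorted, PySem.Set.mem_ofList]
      have h2 : ∀ p ∈ PySem.List.sorted (PySem.Set.ofList (xs.map key)) (fun p => p) false,
          ∀ a ∈ xs.filter (fun a => key a == p), key a = p := by
        intro p _ a ha
        have := (List.mem_filter.mp ha).2
        simpa using this
      have h3 : ∀ p ∈ PySem.List.sorted (PySem.Set.ofList (xs.map key)) (fun p => p) false,
          xs.filter (fun a => key a == p) ≠ [] := by
        intro p hp
        rcases List.mem_map.mp ((hmemks p).mp hp) with ⟨a, ha, hk⟩
        intro hnil
        have : a ∈ xs.filter (fun a => key a == p) := List.mem_filter.mpr ⟨ha, by simp [hk]⟩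
        rw [hnil] at this
        cases this
      have h4 : key d ∉ PySem.List.sorted (PySem.Set.ofList (xs.map key)) (fun p => p) false →
          xs.filter (fun a => key a == key d) = [] := by
        intro hnm
        rw [List.filter_eq_nil_iff]
        intro a ha
        simp only [beq_iff_eq]
        intro he
        exact hnm ((hmemks (key d)).mpr (List.mem_map.mpr ⟨a, ha, he⟩))
      have hbucket : ∀ p, (xs ++ [d]).filter (fun a => key a == p) =
          xs.filter (fun a => key a == p) ++ if key d = p then [d] else [] := by
        intro p
        rw [List.filter_append]
        congr 1
        by_cases h : key d = p <;> simp [h]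
      have hkeys : PySem.List.sorted (PySem.Set.ofList ((xs ++ [d]).map key)) (fun p => p) false =
          pvInskey (key d) (PySem.List.sorted (PySem.Set.ofList (xs.map key)) (fun p => p) false) := by
        rw [List.map_append, List.map_singleton, PySem.Set.ofList_append_singleton]
        by_cases hm : key d ∈ PySem.Set.ofList (xs.map key)
        · rw [PySem.Set.add_of_mem hm]
          exact (pvInskey_of_mem (key d) _ ((hmemks _).mpr ((PySem.Set.mem_ofList _ _).mp hm)) hpair).symm
        · rw [PySem.Set.add_of_not_mem hm, pv_sorted_append_singleton (fun p => p) _ (key d)]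
          exact pv_insertBy_id_eq_pvInskey (key d) _
            (fun hm' => hm ((PySem.Set.mem_ofList _ _).mpr ((hmemks _).mp hm')))
      rw [pv_sorted_append_singleton, ih, hkeys,
        pv_insertBy_flatMap_buckets key d _ _ hpair h2 h3 h4]
      apply List.flatMap_congr
      intro p _
      rw [hbucket p]

-- A's flattening loop builds pvF
lemma pv_flat_eq (consumers_data : List (String × List (String × Int))) (priority_map : List (String × Int)) :
    consumers_data.foldl (fun acc cc =>
      cc.2.foldl (fun acc nc =>
        acc ++ [(cc.1, nc.1, (PySem.Dict.mk priority_map).getD nc.1 33, nc.2)]) acc) [] =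
    pvF consumers_data priority_map := by
  rw [PySem.List.foldl_congr_mem _ _
      (fun acc cc => acc ++ cc.2.map (fun nc => (cc.1, nc.1, pvPrio priority_map nc.1, nc.2))) _
      (fun acc cc _ => PySem.List.foldl_append_singleton_eq_map _ _ _)]
  rw [PySem.List.foldl_append_eq_flatMap]
  rfl

lemma pv_A_eq (consumers_data : List (String × List (String × Int))) (priority_map : List (String × Int)) :
    sort_consumers_by_priority consumers_data priority_map =
    (PySem.List.sorted (pvF consumers_data priority_map) (fun x => x.2.2.1) false).flatMap
      (pvEA consumers_data) := by
  show (PySem.List.sorted (consumers_data.foldl (fun acc cc =>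
      cc.2.foldl (fun acc nc =>
        acc ++ [(cc.1, nc.1, (PySem.Dict.mk priority_map).getD nc.1 33, nc.2)]) acc) [])
      (fun x => x.2.2.1) false).flatMap (pvEA consumers_data) = _
  rw [pv_flat_eq]

-- B's bucket dict, characterised
lemma pv_buckets_eq (consumers_data : List (String × List (String × Int))) (priority_map : List (String × Int)) :
    consumers_data.foldl (fun b cc =>
      cc.2.foldl (fun b nc =>
        b.modify ((PySem.Dict.mk priority_map).getD nc.1 33) [] (· ++ [(cc.1, nc.1, nc.2)])) b)
      PySem.Dict.empty =
    ((pvF consumers_data priority_map).map (fun q => (q.2.2.1, (q.1, q.2.1, q.2.2.2)))).foldl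
      (fun d p => d.modify p.1 [] (· ++ [p.2])) PySem.Dict.empty := by
  have hmap : (pvF consumers_data priority_map).map (fun q => (q.2.2.1, (q.1, q.2.1, q.2.2.2))) =
      consumers_data.flatMap (fun cc => cc.2.map (fun nc => (pvPrio priority_map nc.1, (cc.1, nc.1, nc.2)))) := by
    unfold pvF
    rw [List.map_flatMap]
    apply List.flatMap_congr
    intro cc _
    rw [List.map_map]
    rfl
  rw [hmap, List.foldl_flatMap]
  apply PySem.List.foldl_congr_mem
  intro acc cc _
  rw [List.foldl_map]
  rfl

lemma pv_B_eq' (consumers_data : List (String × List (String × Int))) (priority_map : List (String × Int))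
    (b : PySem.Dict Int (List (String × String × Int)))
    (hb : b = consumers_data.foldl (fun b cc =>
      cc.2.foldl (fun b nc =>
        b.modify ((PySem.Dict.mk priority_map).getD nc.1 33) [] (· ++ [(cc.1, nc.1, nc.2)])) b)
      PySem.Dict.empty) :
    (PySem.List.sorted b.keys (fun p => p) false).foldl (fun res p =>
      (b.getD p []).foldl (fun res t =>
        res ++ PySem.List.pyRepeat [[(t.1, t.2.1)]] t.2.2) res) [] =
    (PySem.List.sorted (PySem.Set.ofList ((pvF consumers_data priority_map).map (fun q => q.2.2.1))) (fun p => p) false).flatMap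
      (fun p => ((pvF consumers_data priority_map).filter (fun q => q.2.2.1 == p)).flatMap
        (fun q => List.replicate q.2.2.2.toNat [(q.1, q.2.1)])) := by
  have hkeys : b.keys = PySem.Set.ofList ((pvF consumers_data priority_map).map (fun q => q.2.2.1)) := by
    rw [hb, pv_buckets_eq,
      PySem.Dict.keys_foldl_modify_key _ Prod.fst [] (fun _ p v => v ++ [p.2]) PySem.Dict.empty,
      PySem.Dict.keys_empty, PySem.Set.update_nil_left, List.map_map]
    rfl
  have hgetD : ∀ p, b.getD p [] =
      (((pvF consumers_data priority_map).map (fun q => (q.2.2.1, (q.1, q.2.1, q.2.2.2)))).filter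
        (fun q => q.1 == p)).map (fun q => q.2) := by
    intro p
    rw [hb, pv_buckets_eq, PySem.Dict.getD_foldl_modify_append _ PySem.Dict.empty p]
    simp [PySem.Dict.getD_empty]
  rw [hkeys]
  rw [PySem.List.foldl_congr_mem _ _
      (fun res p => res ++ ((((pvF consumers_data priority_map).map (fun q => (q.2.2.1, (q.1, q.2.1, q.2.2.2)))).filter
        (fun q => q.1 == p)).map (fun q => q.2)).flatMap
        (fun t => PySem.List.pyRepeat [[(t.1, t.2.1)]] t.2.2)) _
      (fun res p _ => by rw [hgetD p, PySem.List.foldl_append_eq_flatMap])]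
  rw [PySem.List.foldl_append_eq_flatMap, List.nil_append]
  apply List.flatMap_congr
  intro p _
  rw [List.filter_map]
  have hcomp : ((fun q : Int × String × String × Int => q.1 == p) ∘
      (fun q : String × String × Int × Int => (q.2.2.1, (q.1, q.2.1, q.2.2.2)))) =
      (fun q : String × String × Int × Int => q.2.2.1 == p) := rfl
  rw [hcomp, List.map_map, List.flatMap_map]
  apply List.flatMap_congr
  intro q _
  simp [PySem.List.pyRepeat_singleton]

lemma pv_B_eq (consumers_data : List (String × List (String × Int))) (priority_map : List (String × Int)) :
    sort_consumers_by_priority_alt consumers_data priority_map =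
    (PySem.List.sorted (PySem.Set.ofList ((pvF consumers_data priority_map).map (fun q => q.2.2.1))) (fun p => p) false).flatMap
      (fun p => ((pvF consumers_data priority_map).filter (fun q => q.2.2.1 == p)).flatMap
        (fun q => List.replicate q.2.2.2.toNat [(q.1, q.2.1)])) :=
  pv_B_eq' consumers_data priority_map _ rfl

-- under Pre_, the re-indexing lookup in A's final comprehension recovers the stored count
lemma pv_EA_eq (consumers_data : List (String × List (String × Int))) (priority_map : List (String × Int))
    (hpre : Pre_sort_consumers_by_priority consumers_data priority_map)
    (q : String × String × Int × Int) (hq : q ∈ pvF consumers_data priority_map) :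
    pvEA consumers_data q = List.replicate q.2.2.2.toNat [(q.1, q.2.1)] := by
  rcases List.mem_flatMap.mp hq with ⟨cc, hcc, hq2⟩
  rcases List.mem_map.mp hq2 with ⟨nc, hnc, rfl⟩
  have h1 : (PySem.Dict.mk consumers_data).get? cc.1 = some cc.2 := by
    apply PySem.Dict.get?_of_mem_items
    · show (cc.1, cc.2) ∈ consumers_data
      simpa using hcc
    · rw [PySem.Dict.keys_mk]
      exact hpre.1
  have h2 : (PySem.Dict.mk cc.2).get? nc.1 = some nc.2 := by
    apply PySem.Dict.get?_of_mem_items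
    · show (nc.1, nc.2) ∈ cc.2
      simpa using hnc
    · rw [PySem.Dict.keys_mk]
      exact hpre.2 cc hcc
  unfold pvEA
  simp only [h1, h2]
  rw [List.map_const', PySem.List.length_pyRange_one]
  norm_num

-- ===== VERDICT (by name: the statement is the Claim_ definition above) =====
theorem sort_consumers_by_priority_spec : Claim_equal_sort_consumers_by_priority := by
  intro consumers_data priority_map _ hpre
  show sort_consumers_by_priority consumers_data priority_map =
    sort_consumers_by_priority_alt consumers_data priority_map
  rw [pv_A_eq, pv_B_eq, pv_stable_bucket (fun x => x.2.2.1) (pvF consumers_data priority_map),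
    List.flatMap_assoc]
  apply List.flatMap_congr
  intro p _
  apply List.flatMap_congr
  intro q hq
  exact pv_EA_eq consumers_data priority_map hpre q (List.mem_filter.mp hq).1
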